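-- pv_equiv track=rewrite | github.com/Youzini-afk/GenericAgent | ga.py | _fold_earlier
-- ===== SOURCE A (Python) =====
-- def _fold_earlier(lines):
--     FALLBACK = '直接回答了用户问题'
--     parts, cnt, last = [], 0, ''
--     def flush():
--         if cnt:
--             if FALLBACK in last: parts.append(f'[Agent]（{cnt} turns）')
--             else: parts.append(f'{last}（{cnt} turns）')
--     for line in lines:
--         if line.startswith('[USER]'):
--             flush(); parts.append(line); cnt = 0; last = ''
--         else: cnt += 1; last = line
--     flush()
--     return "\n".join(parts[-150:])
-- ===== SOURCE B (Python) =====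
-- def _fold_earlier(lines):
--     FALLBACK = '直接回答了用户问题'
--     parts = []
--     i, n = 0, len(lines)
--     while i < n:
--         if lines[i].startswith('[USER]'):
--             parts.append(lines[i])
--             i += 1
--         else:
--             j = i + 1
--             while j < n and not lines[j].startswith('[USER]'):
--                 j += 1
--             last = lines[j - 1]
--             label = '[Agent]' if FALLBACK in last else last
--             parts.append(f'{label}（{j - i} turns）')
--             i = j
--     return "\n".join(parts[-150:])
-- ===== Notes on version B (the rewrite author's own statement) =====
-- stated objective: alternative
-- what changed: Replaces the stateful cnt/last accumulator with flush-on-boundary closure by a run-partition decomposition: the input is split into maximal runs of non-[USER] lines (an explicit span per run) and each run is summarized from its materialized list (len(run), run[-1]), with no cross-iteration counter state.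
import Mathlib
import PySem

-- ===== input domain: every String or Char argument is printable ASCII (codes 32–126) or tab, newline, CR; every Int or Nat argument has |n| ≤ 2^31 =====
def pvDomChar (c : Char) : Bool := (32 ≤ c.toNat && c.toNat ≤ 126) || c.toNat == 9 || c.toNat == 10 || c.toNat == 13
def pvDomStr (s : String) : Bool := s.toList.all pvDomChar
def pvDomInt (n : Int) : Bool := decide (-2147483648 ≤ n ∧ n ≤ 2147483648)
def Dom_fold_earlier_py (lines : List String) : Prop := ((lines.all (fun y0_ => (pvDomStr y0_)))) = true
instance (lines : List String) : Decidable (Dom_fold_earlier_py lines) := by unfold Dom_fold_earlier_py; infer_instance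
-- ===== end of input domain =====

-- B replaces A's stateful cnt/last accumulator (flushed at each [USER] boundary) by a
-- run-partition decomposition: split off each maximal run of non-[USER] lines and summarize
-- it from the materialized run; objective: alternative (same O(n) cost).

-- ===== PORT A =====
-- A's flush(): appends the folded entry for the pending run (if cnt:)
def aFlush (parts : List String) (cnt : Int) (last : String) : List String :=
  if cnt ≠ 0 then
    if PySem.Str.isIn "直接回答了用户问题" last then
      parts ++ ["[Agent]（" ++ PySem.Int.toStr cnt ++ " turns）"]
    else
      parts ++ [last ++ "（" ++ PySem.Int.toStr cnt ++ " turns）"]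
  else parts

-- A's loop body over state (parts, cnt, last)
def aStep (st : List String × Int × String) (line : String) : List String × Int × String :=
  if PySem.Str.startswith line "[USER]" then (aFlush st.1 st.2.1 st.2.2 ++ [line], 0, "")
  else (st.1, st.2.1 + 1, line)

def fold_earlier_py (lines : List String) : String :=
  PySem.Str.join "\n"
    (PySem.List.slice
      (aFlush (lines.foldl aStep ([], 0, "")).1 (lines.foldl aStep ([], 0, "")).2.1
        (lines.foldl aStep ([], 0, "")).2.2)
      (some (-150)) none)

-- ===== PORT B =====
-- B's inner while: split off the maximal leading run of non-[USER] lines, returning (run, rest)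
def bRun : List String → List String × List String
  | [] => ([], [])
  | l :: t =>
    if PySem.Str.startswith l "[USER]" then ([], l :: t)
    else (l :: (bRun t).1, (bRun t).2)

theorem bRun_snd_length_le (t : List String) : (bRun t).2.length ≤ t.length := by
  induction t with
  | nil => simp [bRun]
  | cons l t ih =>
      simp only [bRun]
      split
      · simp
      · simpa using Nat.le_succ_of_le ih

-- B's run summary: f'{label}（{len(run)} turns）' with last = run[-1]
def bEntry (cnt : Int) (last : String) : String :=
  (if PySem.Str.isIn "直接回答了用户问题" last then "[Agent]" else last)
    ++ "（" ++ PySem.Int.toStr cnt ++ " turns）"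

-- B's outer while over the remaining lines
def bLoop : List String → List String
  | [] => []
  | l :: t =>
    if PySem.Str.startswith l "[USER]" then l :: bLoop t
    else
      bEntry ((l :: (bRun t).1).length : Int) ((l :: (bRun t).1).getLastD "")
        :: bLoop (bRun t).2
  termination_by rest => rest.length
  decreasing_by
    · simp
    · have := bRun_snd_length_le t; simp; omega

def fold_earlier_py_alt (lines : List String) : String :=
  PySem.Str.join "\n" (PySem.List.slice (bLoop lines) (some (-150)) none)

-- ===== PRECONDITION & SPEC =====
def Spec_fold_earlier_py (lines : List String) (out : String) : Prop := out = fold_earlier_py_alt lines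
instance (lines : List String) (out : String) : Decidable (Spec_fold_earlier_py lines out) := by unfold Spec_fold_earlier_py; infer_instance

-- ===== CLAIM (what is proved, stated in full; the proofs are below) =====
def Claim_equal_fold_earlier_py : Prop := ∀ (lines : List String), Dom_fold_earlier_py lines → Spec_fold_earlier_py lines (fold_earlier_py lines)

-- ===== LEMMAS AND PROOFS =====

theorem bLoop_nil : bLoop [] = [] := by rw [bLoop]

theorem bLoop_cons_user {l : String} {t : List String} (h : PySem.Str.startswith l "[USER]" = true) :
    bLoop (l :: t) = l :: bLoop t := by rw [bLoop, h]; simp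

theorem bLoop_cons_agent {l : String} {t : List String} (h : PySem.Str.startswith l "[USER]" = false) :
    bLoop (l :: t)
      = bEntry ((l :: (bRun t).1).length : Int) ((l :: (bRun t).1).getLastD "") :: bLoop (bRun t).2 := by
  rw [bLoop, h]; simp

theorem bRun_cons_user {l : String} {t : List String} (h : PySem.Str.startswith l "[USER]" = true) :
    bRun (l :: t) = ([], l :: t) := by simp only [bRun]; rw [h]; simp

theorem bRun_cons_agent {l : String} {t : List String} (h : PySem.Str.startswith l "[USER]" = false) :
    bRun (l :: t) = (l :: (bRun t).1, (bRun t).2) := by simp only [bRun]; rw [h]; simp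

-- A's flush writes exactly the B-shaped entry
theorem aFlush_eq (parts : List String) (cnt : Int) (last : String) :
    aFlush parts cnt last = parts ++ (if cnt ≠ 0 then [bEntry cnt last] else []) := by
  unfold aFlush bEntry
  split_ifs with h1 h2
  · rw [show ("[Agent]" ++ "（" : String) = "[Agent]（" from rfl, String.append_assoc]
  · rw [String.append_assoc]
  · simp

-- the pending-run view of the tail of A's loop
def pend (cnt : Int) (last : String) (rest : List String) : List String :=
  (if cnt + ((bRun rest).1.length : Int) ≠ 0 then
      [bEntry (cnt + ((bRun rest).1.length : Int)) ((bRun rest).1.getLastD last)]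
    else []) ++ bLoop (bRun rest).2

theorem pend_nil (cnt : Int) (last : String) :
    pend cnt last [] = if cnt ≠ 0 then [bEntry cnt last] else [] := by
  simp only [pend, bRun, bLoop_nil]
  simp

theorem pend_cons_user {l : String} {t : List String} (cnt : Int) (last : String)
    (h : PySem.Str.startswith l "[USER]" = true) :
    pend cnt last (l :: t) = (if cnt ≠ 0 then [bEntry cnt last] else []) ++ (l :: bLoop t) := by
  unfold pend
  rw [bRun_cons_user h, bLoop_cons_user h]
  simp

theorem pend_cons_agent {l : String} {t : List String} (cnt : Int) (last : String)
    (h : PySem.Str.startswith l "[USER]" = false) :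
    pend cnt last (l :: t) = pend (cnt + 1) l t := by
  unfold pend
  rw [bRun_cons_agent h]
  have hc : cnt + (((l :: (bRun t).1).length : Nat) : Int) = cnt + 1 + ((bRun t).1.length : Int) := by
    rw [List.length_cons]; push_cast; ring
  rw [List.getLastD_cons, hc]

theorem bLoop_eq_pend_zero (t : List String) : bLoop t = pend 0 "" t := by
  cases t with
  | nil => rw [bLoop_nil, pend_nil]; simp
  | cons l t =>
    cases h : PySem.Str.startswith l "[USER]" with
    | true => rw [bLoop_cons_user h, pend_cons_user 0 "" h]; simp
    | false =>
      rw [bLoop_cons_agent h]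
      unfold pend
      rw [bRun_cons_agent h]
      rw [if_pos (by simp only [List.length_cons]; omega)]
      simp

theorem aStep_user {l : String} (parts : List String) (cnt : Int) (last : String)
    (h : PySem.Str.startswith l "[USER]" = true) :
    aStep (parts, cnt, last) l = (aFlush parts cnt last ++ [l], 0, "") := by
  simp only [aStep]; rw [h]; simp

theorem aStep_agent {l : String} (parts : List String) (cnt : Int) (last : String)
    (h : PySem.Str.startswith l "[USER]" = false) :
    aStep (parts, cnt, last) l = (parts, cnt + 1, l) := by
  simp only [aStep]; rw [h]; simp

theorem invariant (rest : List String) : ∀ (parts : List String) (cnt : Int) (last : String),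
    aFlush (rest.foldl aStep (parts, cnt, last)).1 (rest.foldl aStep (parts, cnt, last)).2.1
        (rest.foldl aStep (parts, cnt, last)).2.2
      = parts ++ pend cnt last rest := by
  induction rest with
  | nil =>
    intro parts cnt last
    rw [List.foldl_nil, pend_nil, aFlush_eq]
  | cons l t ih =>
    intro parts cnt last
    rw [List.foldl_cons]
    cases h : PySem.Str.startswith l "[USER]" with
    | true =>
      rw [aStep_user parts cnt last h, ih, ← bLoop_eq_pend_zero, pend_cons_user cnt last h, aFlush_eq]
      simp
    | false =>
      rw [aStep_agent parts cnt last h, ih, pend_cons_agent cnt last h]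

theorem aParts_eq_bLoop (lines : List String) :
    aFlush (lines.foldl aStep ([], 0, "")).1 (lines.foldl aStep ([], 0, "")).2.1
        (lines.foldl aStep ([], 0, "")).2.2
      = bLoop lines := by
  rw [invariant lines [] 0 "", bLoop_eq_pend_zero]
  simp

-- ===== VERDICT (by name: the statement is the Claim_ definition above) =====
theorem fold_earlier_py_spec : Claim_equal_fold_earlier_py := by
  intro lines _
  unfold Spec_fold_earlier_py fold_earlier_py fold_earlier_py_alt
  rw [aParts_eq_bLoop]
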